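-- pv_equiv track=rewrite | github.com/geoffreyweal/EKMC | EKMC/EKMC_Setup/EKMC_Only_Setup/EKMC_Only_Setup.py | save_all_coupling_values_data
-- ===== SOURCE A (Python) =====
-- def save_all_coupling_values_data(all_coupling_values):
-- 	"""
-- 	This method is designed to order the printing of all_coupling_values.
--
-- 	Parameters
-- 	----------
-- 	all_coupling_values : dict.
-- 		This dictionary contains all the information about the neighbourhoods that surrounded each molecule in your crystal.
--
-- 	Returns
-- 	-------
-- 	to_string : str.
-- 		This is the written string that contains information about all the coupling energies and etc between molecules in all the local neighbourhoods.
-- 	"""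
--
-- 	# First, create a list to place data into
-- 	to_string = []
-- 	for mol1 in sorted(all_coupling_values.keys()):
-- 		to_string_mol1_data = []
-- 		for mol2 in sorted(all_coupling_values[mol1].keys()):
-- 			to_string_mol1_mol2_data = []
-- 			for cell_point, rate_constant_data in sorted(all_coupling_values[mol1][mol2].items(), key=lambda cpd: tuple([order_number(cp) for cp in cpd[0]])):
-- 				to_string_mol1_mol2_data.append(str(cell_point)+': '+str(rate_constant_data))
-- 			to_string_mol1_mol2_data = '{' + ', '.join(to_string_mol1_mol2_data) + '}'
-- 			to_string_mol1_data.append(str(mol2)+': '+str(to_string_mol1_mol2_data))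
-- 		to_string_mol1_data = '{' + ', '.join(to_string_mol1_data) + '}'
-- 		to_string.append(str(mol1)+': '+str(to_string_mol1_data))
-- 	to_string = '{' + ', '.join(to_string) + '}'
--
-- 	return to_string
--
-- def order_number(value):
-- 	if value == 0:
-- 		return value
-- 	elif value < 0:
-- 		return abs(value)*2
-- 	elif value > 0:
-- 		return abs(value)*2 - 1
-- ===== SOURCE B (Python) =====
-- def save_all_coupling_values_data(all_coupling_values):
-- 	"""Serialize the nested coupling dict with ONE recursive helper instead of
-- 	three hardcoded loops: levels whose values are dicts sort items by key and
-- 	recurse; the leaf level sorts items by a branch-free cell-point key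
-- 	(2*|c| - (c>0), which takes exactly order_number's values)."""
-- 	def cell_key(item):
-- 		return tuple(2 * abs(c) - (c > 0) for c in item[0])
-- 	def by_key(item):
-- 		return item[0]
-- 	def serialize(d):
-- 		if any(isinstance(v, dict) for v in d.values()):
-- 			parts = [str(k) + ': ' + serialize(v) for k, v in sorted(d.items(), key=by_key)]
-- 		else:
-- 			parts = [str(k) + ': ' + str(v) for k, v in sorted(d.items(), key=cell_key)]
-- 		return '{' + ', '.join(parts) + '}'
-- 	return serialize(all_coupling_values)
-- ===== Notes on version B (the rewrite author's own statement) =====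
-- stated objective: simpler
-- what changed: Replaces A's three hardcoded accumulator loops over sorted key lists with dict lookups by one recursive serialize(d) helper that dispatches on whether d's values are dicts, sorting items by key at non-leaf levels and by a branch-free 2*|c|-(c>0) cell key (equal to order_number's values) at the leaf level.
import Mathlib
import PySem

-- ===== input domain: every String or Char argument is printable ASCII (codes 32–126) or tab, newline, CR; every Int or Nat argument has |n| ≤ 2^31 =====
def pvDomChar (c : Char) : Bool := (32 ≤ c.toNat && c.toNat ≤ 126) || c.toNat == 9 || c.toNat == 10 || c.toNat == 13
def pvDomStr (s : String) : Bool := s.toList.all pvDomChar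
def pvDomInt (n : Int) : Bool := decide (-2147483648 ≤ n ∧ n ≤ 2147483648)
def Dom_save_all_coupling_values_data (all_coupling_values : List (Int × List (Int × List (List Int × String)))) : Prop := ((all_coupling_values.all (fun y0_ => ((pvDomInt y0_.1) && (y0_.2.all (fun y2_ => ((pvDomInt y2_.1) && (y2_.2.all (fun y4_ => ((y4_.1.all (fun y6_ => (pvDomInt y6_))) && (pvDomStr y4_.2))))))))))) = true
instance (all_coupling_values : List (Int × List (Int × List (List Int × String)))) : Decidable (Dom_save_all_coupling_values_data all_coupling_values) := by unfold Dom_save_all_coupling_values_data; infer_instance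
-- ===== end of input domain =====

-- B replaces A's three hardcoded accumulator loops (sorted key lists + dict lookups)
-- by one recursive serializer over sorted item lists; objective: simpler.

-- Python's str() of a tuple of ints ("()", "(1,)", "(1, 2)"); hand-ported, exact for int tuples.
def pvTupleStr : List Int → String
  | [] => "()"
  | [x] => "(" ++ PySem.Int.toStr x ++ ",)"
  | xs => "(" ++ PySem.Str.join ", " (xs.map PySem.Int.toStr) ++ ")"

-- ===== PORT A =====
def orderNumber (value : Int) : Int :=
  if value = 0 then value
  else if value < 0 then |value| * 2
  else |value| * 2 - 1

-- A iterates sorted(d.keys()) with d[k] lookups at the two outer levels; under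
-- Pre_ (distinct keys, as in any Python dict) d.keys() is exactly the map of first
-- components and d[k] is the first match (PySem.Dict.getD; the key is always present).
def save_all_coupling_values_data (all_coupling_values : List (Int × List (Int × List (List Int × String)))) : String :=
  let to_string :=
    (PySem.List.sorted (all_coupling_values.map Prod.fst) (fun k => k) false).foldl
      (fun ts mol1 =>
        let d1 := PySem.Dict.getD (PySem.Dict.mk all_coupling_values) mol1 []
        let to_string_mol1_data :=
          (PySem.List.sorted (d1.map Prod.fst) (fun k => k) false).foldl
            (fun ts1 mol2 =>
              let d2 := PySem.Dict.getD (PySem.Dict.mk d1) mol2 []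
              let to_string_mol1_mol2_data :=
                (PySem.List.sorted d2 (fun cpd => cpd.1.map orderNumber) false).foldl
                  (fun ts2 cpd => ts2 ++ [pvTupleStr cpd.1 ++ ": " ++ cpd.2]) []
              ts1 ++ [PySem.Int.toStr mol2 ++ ": " ++
                ("{" ++ PySem.Str.join ", " to_string_mol1_mol2_data ++ "}")]) []
        ts ++ [PySem.Int.toStr mol1 ++ ": " ++
          ("{" ++ PySem.Str.join ", " to_string_mol1_data ++ "}")]) []
  "{" ++ PySem.Str.join ", " to_string ++ "}"

-- ===== PORT B =====
-- Source B's cell_key: branch-free 2*|c| - (c>0) per coordinate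
def pvCellKey (item : List Int × String) : List Int :=
  item.1.map (fun c => 2 * |c| - (if 0 < c then 1 else 0))

def pvBraces (parts : List String) : String := "{" ++ PySem.Str.join ", " parts ++ "}"

-- Source B's single recursive serialize(d) dispatches on whether d's values are dicts;
-- the Lean types resolve that dispatch statically, giving one instance per level
-- (an empty dict takes the leaf branch in Python, which also renders "{}").
-- Non-leaf levels sort items with key=by_key (= Prod.fst here).
def pvSerializeLeaf (d : List (List Int × String)) : String :=
  pvBraces ((PySem.List.sorted d pvCellKey false).map
    (fun kv => pvTupleStr kv.1 ++ ": " ++ kv.2))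

def pvSerializeMid (d : List (Int × List (List Int × String))) : String :=
  pvBraces ((PySem.List.sorted d Prod.fst false).map
    (fun kv => PySem.Int.toStr kv.1 ++ ": " ++ pvSerializeLeaf kv.2))

def save_all_coupling_values_data_alt (all_coupling_values : List (Int × List (Int × List (List Int × String)))) : String :=
  pvBraces ((PySem.List.sorted all_coupling_values Prod.fst false).map
    (fun kv => PySem.Int.toStr kv.1 ++ ": " ++ pvSerializeMid kv.2))

-- ===== PRECONDITION & SPEC =====
-- Pre_ requires distinct keys at every dict level: every Python dict satisfies this,
-- so no input A accepts is excluded; association lists with duplicated keys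
-- correspond to no Python input.
def Pre_save_all_coupling_values_data (all_coupling_values : List (Int × List (Int × List (List Int × String)))) : Prop :=
  (all_coupling_values.map Prod.fst).Nodup ∧
  ∀ p ∈ all_coupling_values, (p.2.map Prod.fst).Nodup ∧
    ∀ q ∈ p.2, (q.2.map Prod.fst).Nodup
instance (all_coupling_values : List (Int × List (Int × List (List Int × String)))) : Decidable (Pre_save_all_coupling_values_data all_coupling_values) := by unfold Pre_save_all_coupling_values_data; infer_instance

def pvWitness_save_all_coupling_values_data : (List (Int × List (Int × List (List Int × String)))) :=
  [(1, [(2, [([0, 1], "v"), ([-1], "w")])]), (0, [])]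

def Spec_save_all_coupling_values_data (all_coupling_values : List (Int × List (Int × List (List Int × String)))) (out : String) : Prop := out = save_all_coupling_values_data_alt all_coupling_values
instance (all_coupling_values : List (Int × List (Int × List (List Int × String)))) (out : String) : Decidable (Spec_save_all_coupling_values_data all_coupling_values out) := by unfold Spec_save_all_coupling_values_data; infer_instance

-- ===== CLAIM (what is proved, stated in full; the proofs are below) =====
def Claim_equal_save_all_coupling_values_data : Prop := ∀ (all_coupling_values : List (Int × List (Int × List (List Int × String)))), Dom_save_all_coupling_values_data all_coupling_values → Pre_save_all_coupling_values_data all_coupling_values → Spec_save_all_coupling_values_data all_coupling_values (save_all_coupling_values_data all_coupling_values)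

-- ===== LEMMAS AND PROOFS =====

-- Source B's branch-free cell key takes exactly order_number's values
theorem cellKey_eq : pvCellKey = (fun cpd : List Int × String => cpd.1.map orderNumber) := by
  funext cpd
  unfold pvCellKey
  refine congrArg (fun f => List.map f cpd.1) ?_
  funext c
  unfold orderNumber
  rcases lt_trichotomy c 0 with h | h | h
  · rw [abs_of_neg h]; split_ifs <;> omega
  · subst h; norm_num
  · rw [abs_of_pos h]; split_ifs <;> omega

theorem insertBy_map_fst {β : Type} (x : Int × β) (acc : List (Int × β)) :
    (PySem.List.insertBy (fun a b => decide (Prod.fst a < Prod.fst b)) x acc).map Prod.fst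
      = PySem.List.insertBy (fun a b => decide (a < b)) x.1 (acc.map Prod.fst) := by
  induction acc with
  | nil => rfl
  | cons y ys ih =>
    simp only [PySem.List.insertBy, List.map_cons]
    split_ifs <;> simp_all

theorem foldl_insertBy_map_fst {β : Type} :
    ∀ (l : List (Int × β)) (acc : List (Int × β)),
    (l.foldl (fun acc x => PySem.List.insertBy (fun a b => decide (Prod.fst a < Prod.fst b)) x acc) acc).map Prod.fst
      = (l.map Prod.fst).foldl (fun acc k => PySem.List.insertBy (fun a b => decide (a < b)) k acc) (acc.map Prod.fst) := by
  intro l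
  induction l with
  | nil => intro acc; rfl
  | cons x xs ih => intro acc; simp only [List.foldl_cons, List.map_cons, ih, insertBy_map_fst]

theorem map_fst_sorted {β : Type} (l : List (Int × β)) :
    (PySem.List.sorted l Prod.fst false).map Prod.fst
      = PySem.List.sorted (l.map Prod.fst) (fun k => k) false := by
  rw [PySem.List.sorted_eq_foldl_insertBy, PySem.List.sorted_eq_foldl_insertBy]
  exact foldl_insertBy_map_fst l []

theorem getD_mk_of_mem {β : Type} (l : List (Int × β)) (kv : Int × β) (dflt : β)
    (hnd : (l.map Prod.fst).Nodup) (hmem : kv ∈ l) :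
    PySem.Dict.getD (PySem.Dict.mk l) kv.1 dflt = kv.2 := by
  induction l with
  | nil => cases hmem
  | cons p rest ih =>
    simp only [List.map_cons, List.nodup_cons] at hnd
    rcases List.mem_cons.mp hmem with h | h
    · subst h
      simp [PySem.Dict.getD, PySem.Dict.get?, List.find?]
    · have hne : (p.1 == kv.1) = false := by
        refine beq_eq_false_iff_ne.mpr (fun he => hnd.1 (he ▸ List.mem_map_of_mem h))
      have := ih hnd.2 h
      simp only [PySem.Dict.getD, PySem.Dict.get?] at this ⊢
      simpa [List.find?, hne] using this

-- one dict level of A (sorted keys + lookup, foldl-append) equals one level of B (map over sorted items)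
theorem level_eq {β : Type} (l : List (Int × β)) (dflt : β)
    (hnd : (l.map Prod.fst).Nodup) (f : Int → β → String) :
    (PySem.List.sorted (l.map Prod.fst) (fun k => k) false).foldl
      (fun acc k => acc ++ [f k (PySem.Dict.getD (PySem.Dict.mk l) k dflt)]) []
    = (PySem.List.sorted l Prod.fst false).map (fun kv => f kv.1 kv.2) := by
  rw [PySem.List.foldl_append_singleton_eq_map, List.nil_append, ← map_fst_sorted, List.map_map]
  refine List.map_congr_left (fun kv hkv => ?_)
  have hmem : kv ∈ l := (PySem.List.mem_sorted l Prod.fst false kv).mp hkv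
  simp only [Function.comp_apply, getD_mk_of_mem l kv dflt hnd hmem]

-- ===== VERDICT (by name: the statement is the Claim_ definition above) =====
theorem save_all_coupling_values_data_spec : Claim_equal_save_all_coupling_values_data := by
  intro acv _hdom hpre
  obtain ⟨hnd1, hrest⟩ := hpre
  unfold Spec_save_all_coupling_values_data save_all_coupling_values_data save_all_coupling_values_data_alt
  rw [level_eq acv [] hnd1 (fun mol1 d1 =>
    PySem.Int.toStr mol1 ++ ": " ++
      ("{" ++ PySem.Str.join ", "
        ((PySem.List.sorted (d1.map Prod.fst) (fun k => k) false).foldl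
          (fun ts1 mol2 =>
            ts1 ++ [PySem.Int.toStr mol2 ++ ": " ++
              ("{" ++ PySem.Str.join ", "
                ((PySem.List.sorted (PySem.Dict.getD (PySem.Dict.mk d1) mol2 [])
                    (fun cpd => cpd.1.map orderNumber) false).foldl
                  (fun ts2 cpd => ts2 ++ [pvTupleStr cpd.1 ++ ": " ++ cpd.2]) []) ++ "}")]) []) ++ "}"))]
  unfold pvBraces pvSerializeMid pvSerializeLeaf pvBraces
  refine congrArg (fun p => "{" ++ PySem.Str.join ", " p ++ "}") ?_
  refine List.map_congr_left (fun m1d1 hm1 => ?_)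
  obtain ⟨hnd2, _⟩ := hrest m1d1 ((PySem.List.mem_sorted acv Prod.fst false m1d1).mp hm1)
  rw [level_eq m1d1.2 [] hnd2 (fun mol2 d2 =>
    PySem.Int.toStr mol2 ++ ": " ++
      ("{" ++ PySem.Str.join ", "
        ((PySem.List.sorted d2 (fun cpd => cpd.1.map orderNumber) false).foldl
          (fun ts2 cpd => ts2 ++ [pvTupleStr cpd.1 ++ ": " ++ cpd.2]) []) ++ "}"))]
  refine congrArg (fun p => PySem.Int.toStr m1d1.1 ++ ": " ++ ("{" ++ PySem.Str.join ", " p ++ "}")) ?_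
  refine List.map_congr_left (fun m2d2 _ => ?_)
  rw [PySem.List.foldl_append_singleton_eq_map (fun cpd => pvTupleStr cpd.1 ++ ": " ++ cpd.2)
        (PySem.List.sorted m2d2.2 (fun cpd => cpd.1.map orderNumber) false) [],
    List.nil_append, cellKey_eq]
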